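-- pv_equiv track=rewrite | github.com/cecilia-uu/LeetCode | OA/meta/1_readings.py | solution
-- ===== SOURCE A (Python) =====
-- def solution(readings, k) -> int:
--     res = 0
--     cur_k = 1  # Start with k^0 = 1 (first power of k)
--
--     readings.sort()  # Sort the readings to iterate in increasing order
--
--     for r in readings:
--         # Compare the reading with powers of k until we surpass the current reading
--         while cur_k < r:
--             cur_k *= k
--         # If a reading matches a power of k, increment the result
--         if cur_k == r:
--             res += 1
--
--     return res
-- ===== SOURCE B (Python) =====
-- def _is_power(r, k):
--     # r is counted iff it is an exact nonnegative power of k (hence r >= 1).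
--     if r == 1:
--         return True
--     if r < 1:
--         return False
--     while r % k == 0:
--         r //= k
--     return r == 1
--
--
-- def solution(readings, k) -> int:
--     return sum(1 for r in readings if _is_power(r, k))
-- ===== Notes on version B (the rewrite author's own statement) =====
-- stated objective: alternative
-- what changed: B drops the sort and the shared ascending power ladder entirely and tests each reading independently for being an exact power of k by repeated exact division; Pre_ excludes only |k| <= 1 together with a reading > 1, where A's ladder never reaches the reading and A loops forever (B loops forever or raises ZeroDivisionError there too).
import Mathlib
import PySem

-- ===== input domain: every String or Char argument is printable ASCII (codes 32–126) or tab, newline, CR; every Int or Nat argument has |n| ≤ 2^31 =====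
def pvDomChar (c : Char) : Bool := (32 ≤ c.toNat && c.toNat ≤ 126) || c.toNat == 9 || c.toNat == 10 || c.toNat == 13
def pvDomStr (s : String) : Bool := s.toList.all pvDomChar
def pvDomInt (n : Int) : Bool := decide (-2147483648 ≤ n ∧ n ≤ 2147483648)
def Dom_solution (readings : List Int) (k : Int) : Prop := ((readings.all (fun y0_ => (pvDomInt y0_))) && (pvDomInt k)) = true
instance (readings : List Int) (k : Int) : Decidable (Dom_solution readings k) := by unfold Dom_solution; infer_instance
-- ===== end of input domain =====

-- B replaces A's sort + shared ascending power ladder by an independent per-element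
-- power-of-k test via repeated exact division (objective: alternative / no sort).
-- Python A sorts `readings` in place; the equivalence proved here is about the return value only.

-- ===== PORT A =====
-- the inner `while cur_k < r: cur_k *= k` loop; the fuel is only a totality guard:
-- inside Pre_solution the loop provably stops within the fuel (lemma ladderA_reaches below)
def ladderA (k : Int) : Nat → Int → Int → Int
  | 0, cur, _ => cur
  | fuel+1, cur, r => if cur < r then ladderA k fuel (cur * k) r else cur

-- the body of A's `for r in readings` loop, state = (res, cur_k)
def stepA (k : Int) (st : Int × Int) (r : Int) : Int × Int :=
  let cur := ladderA k (2 * r.natAbs + 2) st.2 r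
  (if cur == r then st.1 + 1 else st.1, cur)

def solution (readings : List Int) (k : Int) : Int :=
  ((PySem.List.sorted readings (fun x => x) false).foldl (stepA k) (0, 1)).1

-- ===== PORT B =====
-- the `while r % k == 0: r //= k` loop; fuel is only a totality guard: with |k| ≥ 2
-- each exact division strictly shrinks |r|, so r.natAbs steps always suffice
def divChain (k : Int) : Nat → Int → Int
  | 0, r => r
  | fuel+1, r => if PySem.Int.mod r k == 0 then divChain k fuel (PySem.Int.floordiv r k) else r

def isPower (r k : Int) : Bool :=
  if r == 1 then true
  else if r < 1 then false
  else divChain k r.natAbs r == 1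

def solution_alt (readings : List Int) (k : Int) : Int :=
  readings.foldl (fun acc r => if isPower r k then acc + 1 else acc) 0

-- ===== PRECONDITION & SPEC =====
-- Pre_ excludes exactly the inputs on which Python A never returns: |k| ≤ 1 together with
-- some reading > 1, where cur_k can never reach the reading and A's while-loop runs forever
-- (B's division loop also runs forever there, or raises ZeroDivisionError for k = 0).
def Pre_solution (readings : List Int) (k : Int) : Prop :=
  2 ≤ k.natAbs ∨ ∀ r ∈ readings, r ≤ 1
instance (readings : List Int) (k : Int) : Decidable (Pre_solution readings k) := by
  unfold Pre_solution; infer_instance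

def pvWitness_solution : List Int × Int := ([9, 1, 8, 7, -3, 8], 2)

def Spec_solution (readings : List Int) (k : Int) (out : Int) : Prop := out = solution_alt readings k
instance (readings : List Int) (k : Int) (out : Int) : Decidable (Spec_solution readings k out) := by unfold Spec_solution; infer_instance

-- ===== CLAIM (what is proved, stated in full; the proofs are below) =====
def Claim_equal_solution : Prop := ∀ (readings : List Int) (k : Int), Dom_solution readings k → Pre_solution readings k → Spec_solution readings k (solution readings k)

-- ===== LEMMAS AND PROOFS =====

-- B's fold just counts the readings satisfying isPower
theorem foldB_eq (k : Int) : ∀ (l : List Int) (acc : Int),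
    l.foldl (fun acc r => if isPower r k then acc + 1 else acc) acc
      = acc + (l.countP (fun r => isPower r k) : Int) := by
  intro l
  induction l with
  | nil => intro acc; simp
  | cons r tl ih =>
    intro acc
    by_cases h : isPower r k <;> simp [List.foldl, h, ih] <;> ring

-- evaluation of the ladder: it returns the first chain value cur·k^m that is ≥ r
theorem ladderA_spec (k : Int) : ∀ (fuel : Nat) (cur r : Int),
    (∃ m, m ≤ fuel ∧ r ≤ cur * k ^ m) →
    ∃ m0 : Nat, ladderA k fuel cur r = cur * k ^ m0 ∧ r ≤ cur * k ^ m0 ∧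
      ∀ i < m0, cur * k ^ i < r := by
  intro fuel
  induction fuel with
  | zero =>
    rintro cur r ⟨m, hm, hr⟩
    interval_cases m
    exact ⟨0, by simp [ladderA], by simpa using hr, by omega⟩
  | succ f ih =>
    rintro cur r ⟨m, hm, hr⟩
    by_cases h : cur < r
    · have hm0 : m ≠ 0 := by rintro rfl; simp at hr; omega
      obtain ⟨m', rfl⟩ := Nat.exists_eq_succ_of_ne_zero hm0
      have hr' : r ≤ cur * k * k ^ m' := by
        calc r ≤ cur * k ^ (m' + 1) := hr
        _ = cur * k * k ^ m' := by ring
      obtain ⟨m0, he, hge, hlt⟩ := ih (cur * k) r ⟨m', by omega, hr'⟩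
      refine ⟨m0 + 1, ?_, ?_, ?_⟩
      · simpa [ladderA, h] using he.trans (by ring)
      · calc r ≤ cur * k * k ^ m0 := hge
        _ = cur * k ^ (m0 + 1) := by ring
      · intro i hi
        cases i with
        | zero => simpa using h
        | succ i' =>
          calc cur * k ^ (i' + 1) = cur * k * k ^ i' := by ring
          _ < r := hlt i' (by omega)
    · exact ⟨0, by simp [ladderA, h], by simpa using not_lt.mp h, by omega⟩

-- with |k| ≥ 2 the fuel 2·|r|+2 always suffices to pass r
theorem exists_pow_ge (k cur r : Int) (hk : 2 ≤ k.natAbs) (hc : 1 ≤ cur) :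
    ∃ m, m ≤ 2 * r.natAbs + 2 ∧ r ≤ cur * k ^ m := by
  by_cases hr : r ≤ 0
  · exact ⟨0, by omega, by simpa using hr.trans (by omega)⟩
  · refine ⟨2 * r.natAbs, by omega, ?_⟩
    have hk2 : (4 : Int) ≤ k ^ 2 := by
      have h1 : (k.natAbs : Int) * k.natAbs = k * k := Int.natAbs_mul_self
      have h2 : (2 : Int) ≤ (k.natAbs : Int) := by exact_mod_cast hk
      nlinarith
    have h2n : ((2 : Int)) ^ r.natAbs ≤ (k ^ 2) ^ r.natAbs :=
      by gcongr <;> linarith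
    have hlt : (r.natAbs : Int) < 2 ^ r.natAbs := by
      exact_mod_cast Nat.lt_two_pow_self (n := r.natAbs)
    have hre : r = (r.natAbs : Int) := (Int.natAbs_of_nonneg (by omega)).symm
    have hpos : (0 : Int) ≤ (k ^ 2) ^ r.natAbs := by positivity
    calc r = (r.natAbs : Int) := hre
      _ ≤ (k ^ 2) ^ r.natAbs := by linarith
      _ ≤ cur * (k ^ 2) ^ r.natAbs := le_mul_of_one_le_left hpos hc
      _ = cur * k ^ (2 * r.natAbs) := by rw [← pow_mul]

-- the first power ≥ r equals r iff r is a power at all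
theorem pow_eq_unique (k : Int) (hk : 2 ≤ k.natAbs) {a b : Nat} {r : Int}
    (h2 : 2 ≤ r) (hge : r ≤ k ^ a) (hlt : ∀ i < a, k ^ i < r) (hi : k ^ b = r) :
    k ^ a = r := by
  have hba : a ≤ b := by
    by_contra h
    exact absurd hi (ne_of_lt (hlt b (by omega)))
  rcases Nat.eq_or_lt_of_le hba with rfl | hab
  · exact hi
  · exfalso
    have hka : (0:Int) < k ^ a := lt_of_lt_of_le (by omega) hge
    have e1 : ((r.natAbs : ℤ)) = r := Int.natAbs_of_nonneg (by omega)
    have e2 : ((k.natAbs ^ a : ℕ) : ℤ) = k ^ a := by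
      rw [← Int.natAbs_pow]; exact Int.natAbs_of_nonneg (le_of_lt hka)
    have h3 : r.natAbs ≤ k.natAbs ^ a := by
      have : ((r.natAbs : ℤ)) ≤ ((k.natAbs ^ a : ℕ) : ℤ) := by rw [e1, e2]; exact hge
      exact_mod_cast this
    have h2 : k.natAbs ^ b = r.natAbs := by rw [← Int.natAbs_pow, hi]
    have h4 : k.natAbs ^ a < k.natAbs ^ b := Nat.pow_lt_pow_right (by omega) hab
    omega

-- B's division chain reaches 1 exactly on the powers of k
theorem divChain_eq_one_iff (k : Int) (hk : 2 ≤ k.natAbs) : ∀ (fuel : Nat) (r : Int),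
    r ≠ 0 → r.natAbs ≤ fuel → (divChain k fuel r = 1 ↔ ∃ i : Nat, k ^ i = r) := by
  intro fuel
  induction fuel with
  | zero => intro r h0 hle; omega
  | succ f ih =>
    intro r h0 hle
    have hk0 : k ≠ 0 := by omega
    by_cases hdvd : PySem.Int.mod r k = 0
    · have hd : k ∣ r := (PySem.Int.mod_eq_zero_iff_dvd r k).mp hdvd
      have hq : PySem.Int.floordiv r k * k = r := by
        have := PySem.Int.floordiv_mul_add_mod r k
        omega
      set q := PySem.Int.floordiv r k with hqdef
      have hq0 : q ≠ 0 := by rintro h; rw [h] at hq; simp at hq; omega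
      have habs : r.natAbs = q.natAbs * k.natAbs := by
        rw [← Int.natAbs_mul, hq]
      have hlt : q.natAbs < r.natAbs := by
        have h1 : 1 ≤ q.natAbs := by omega
        have := hk
        nlinarith [habs]
      have step : divChain k (f + 1) r = divChain k f q := by
        simp [divChain, hdvd, hqdef]
      rw [step, ih q hq0 (by omega)]
      constructor
      · rintro ⟨i, hi⟩
        exact ⟨i + 1, by rw [pow_succ, hi, hq]⟩
      · rintro ⟨i, hi⟩
        cases i with
        | zero =>
          exfalso
          have hr1 : r = 1 := by simpa using hi.symm
          have hd1 : k ∣ (1:ℤ) := hr1 ▸ hd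
          have h := Int.natAbs_dvd_natAbs.mpr hd1
          simp at h
          omega
        | succ i' =>
          refine ⟨i', ?_⟩
          have : k ^ i' * k = q * k := by rw [← pow_succ, hi, ← hq]
          exact mul_right_cancel₀ hk0 this
    · have step : divChain k (f + 1) r = r := by simp [divChain, hdvd]
      rw [step]
      constructor
      · rintro rfl; exact ⟨0, by simp⟩
      · rintro ⟨i, hi⟩
        cases i with
        | zero => simpa using hi.symm
        | succ i' =>
          exfalso
          exact hdvd ((PySem.Int.mod_eq_zero_iff_dvd r k).mpr ⟨k ^ i', by rw [← hi]; ring⟩)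

theorem isPower_iff (r k : Int) (hk : 2 ≤ k.natAbs) :
    isPower r k = true ↔ (1 ≤ r ∧ ∃ i : Nat, k ^ i = r) := by
  unfold isPower
  by_cases h1 : r = 1
  · subst h1; simp; exact ⟨0, by simp⟩
  · by_cases h2 : r < 1
    · simp [h1, h2]
    · have hr2 : 2 ≤ r := by omega
      simp only [h1, h2, beq_iff_eq, if_false]
      rw [divChain_eq_one_iff k hk r.natAbs r (by omega) (le_refl _)]
      constructor
      · intro h; exact ⟨by omega, h⟩
      · rintro ⟨_, h⟩; exact h

-- main invariant of A's fold over the sorted list, |k| ≥ 2 case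
theorem foldA_inv (k : Int) (hk : 2 ≤ k.natAbs) : ∀ (l : List Int) (res : Int) (j : Nat),
    l.Pairwise (· ≤ ·) → 1 ≤ k ^ j → (∀ i < j, ∀ r ∈ l, k ^ i < r) →
    (l.foldl (stepA k) (res, k ^ j)).1 = res + (l.countP (fun r => isPower r k) : Int) := by
  intro l
  induction l with
  | nil => intro res j _ _ _; simp
  | cons r tl ih =>
    intro res j hp hpos hlow
    obtain ⟨hhead, htail⟩ := List.pairwise_cons.mp hp
    have hlow_r : ∀ i < j, k ^ i < r := fun i hi => hlow i hi r (by simp)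
    have hlow_tl : ∀ i < j, ∀ x ∈ tl, k ^ i < x :=
      fun i hi x hx => hlow i hi x (List.mem_cons_of_mem _ hx)
    by_cases hr2 : r ≤ 1
    · -- cur_k is already ≥ r: the while loop does not run
      have hcur : ladderA k (2 * r.natAbs + 2) (k ^ j) r = k ^ j := by
        show ladderA k (2 * r.natAbs + 1 + 1) (k ^ j) r = k ^ j
        simp [ladderA, show ¬ k ^ j < r from by omega]
      have hs : stepA k (res, k ^ j) r = (if k ^ j == r then res + 1 else res, k ^ j) := by
        simp [stepA, hcur]
      rw [List.foldl_cons, hs, List.countP_cons]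
      by_cases hr1 : r = 1
      · have hj0 : j = 0 := by
          by_contra hj
          exact absurd (hlow_r 0 (by omega)) (by simp [hr1])
        subst hj0
        rw [if_pos (by simp [hr1]), ih (res + 1) 0 htail (by norm_num) (by omega)]
        simp [isPower, hr1]
        ring
      · rw [if_neg (by simp; omega), ih res j htail hpos hlow_tl]
        have : isPower r k = false := by simp [isPower, hr1, show r < 1 from by omega]
        simp [this]
    · -- r ≥ 2: the ladder advances to the first power ≥ r
      obtain ⟨m, hm, hge0⟩ := exists_pow_ge k (k ^ j) r hk hpos
      obtain ⟨m0, heq, hge, hlt⟩ := ladderA_spec k (2 * r.natAbs + 2) (k ^ j) r ⟨m, hm, hge0⟩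
      have hcur : ladderA k (2 * r.natAbs + 2) (k ^ j) r = k ^ (j + m0) := by
        rw [heq, ← pow_add]
      have hgeJ : r ≤ k ^ (j + m0) := by rw [pow_add]; exact hge
      have hltJ : ∀ i < j + m0, k ^ i < r := by
        intro i hi
        by_cases hij : i < j
        · exact hlow_r i hij
        · have he : k ^ i = k ^ j * k ^ (i - j) := by
            rw [← pow_add]
            congr 1
            omega
          rw [he]
          exact hlt (i - j) (by omega)
      have hiff : isPower r k = true ↔ k ^ (j + m0) = r := by
        rw [isPower_iff r k hk]
        constructor
        · rintro ⟨_, b, hb⟩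
          exact pow_eq_unique k hk (by omega) hgeJ hltJ hb
        · intro hc
          exact ⟨by omega, j + m0, hc⟩
      have hpos' : 1 ≤ k ^ (j + m0) := le_trans (by omega) hgeJ
      have hlow' : ∀ i < j + m0, ∀ x ∈ tl, k ^ i < x :=
        fun i hi x hx => lt_of_lt_of_le (hltJ i hi) (hhead x hx)
      have hs : stepA k (res, k ^ j) r
          = (if k ^ (j + m0) == r then res + 1 else res, k ^ (j + m0)) := by
        simp [stepA, hcur]
      rw [List.foldl_cons, hs, List.countP_cons]
      by_cases hc : k ^ (j + m0) = r
      · rw [if_pos (beq_iff_eq.mpr hc), ih (res + 1) (j + m0) htail hpos' hlow']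
        simp [hiff.mpr hc]
        ring
      · rw [if_neg (by simpa using hc), ih res (j + m0) htail hpos' hlow']
        have hfalse : isPower r k = false := by
          rcases Bool.eq_false_or_eq_true (isPower r k) with h | h
          · exact absurd (hiff.mp h) hc
          · exact h
        simp [hfalse]

-- |k| ≤ 1 case: all readings ≤ 1, cur_k stays 1
theorem foldA_one (k : Int) : ∀ (l : List Int) (res : Int), (∀ r ∈ l, r ≤ 1) →
    (l.foldl (stepA k) (res, 1)).1 = res + (l.countP (fun r => isPower r k) : Int) := by
  intro l
  induction l with
  | nil => intro res _; simp
  | cons r tl ih =>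
    intro res h
    have hr : r ≤ 1 := h r (by simp)
    have hcur : ladderA k (2 * r.natAbs + 2) 1 r = 1 := by
      show ladderA k (2 * r.natAbs + 1 + 1) 1 r = 1
      simp [ladderA, show ¬(1:Int) < r from by omega]
    have hs : stepA k (res, 1) r = (if (1:Int) == r then res + 1 else res, 1) := by
      simp [stepA, hcur]
    rw [List.foldl_cons, hs, List.countP_cons]
    by_cases hr1 : r = 1
    · rw [if_pos (by simp [hr1]), ih (res + 1) (fun x hx => h x (List.mem_cons_of_mem _ hx))]
      simp [isPower, hr1]
      ring
    · rw [if_neg (by simp; omega), ih res (fun x hx => h x (List.mem_cons_of_mem _ hx))]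
      have : isPower r k = false := by simp [isPower, hr1, show r < 1 from by omega]
      simp [this]

-- ===== VERDICT (by name: the statement is the Claim_ definition above) =====
theorem solution_spec : Claim_equal_solution := by
  intro readings k _hdom hpre
  unfold Spec_solution solution solution_alt
  rw [foldB_eq]
  have hperm : (PySem.List.sorted readings (fun x => x) false).Perm readings :=
    PySem.List.sorted_perm readings (fun x => x) false
  have hcount : ((PySem.List.sorted readings (fun x => x) false).countP (fun r => isPower r k))
      = readings.countP (fun r => isPower r k) := hperm.countP_eq _
  rcases hpre with hk | hle
  · have := foldA_inv k hk (PySem.List.sorted readings (fun x => x) false) 0 0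
      (PySem.List.sorted_pairwise readings (fun x => x))
      (by norm_num) (by omega)
    simpa [hcount] using this
  · have := foldA_one k (PySem.List.sorted readings (fun x => x) false) 0
      (fun r hr => hle r ((PySem.List.mem_sorted readings (fun x => x) false r).mp hr))
    simpa [hcount] using this
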